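-- pv_equiv track=rewrite | github.com/karans5/MAC | mac_verif/coverpoints_mac.py | generate_bitwalking_outputs
-- ===== SOURCE A (Python) =====
-- from itertools import combinations
--
-- def generate_bitwalking_outputs(num_bits, total_size, pattern="ones"):
--     if num_bits > total_size:
--         raise ValueError("num_bits cannot exceed total_size")
--     if pattern not in ["ones", "zeros"]:
--         raise ValueError("pattern must be either 'ones' or 'zeros'")
--
--     results = []
--     bit_positions = combinations(range(total_size), num_bits)
--
--     if pattern == "ones":
--         # Generate walking ones (specified number of 1s, rest 0s)
--         for positions in bit_positions:
--             binary = 0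
--             for pos in positions:
--                 binary |= (1 << (total_size - 1 - pos))
--             results.append(binary)
--     elif pattern == "zeros":
--         # Generate walking zeros (specified number of 0s, rest 1s)
--         for positions in bit_positions:
--             binary = (1 << total_size) - 1
--             for pos in positions:
--                 binary &= ~(1 << (total_size - 1 - pos))
--             results.append(binary)
--     return results
-- ===== SOURCE B (Python) =====
-- def generate_bitwalking_outputs(num_bits, total_size, pattern="ones"):
--     if num_bits > total_size:
--         raise ValueError("num_bits cannot exceed total_size")
--     if pattern not in ["ones", "zeros"]:
--         raise ValueError("pattern must be either 'ones' or 'zeros'")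
--
--     if pattern == "ones":
--         init = 0
--         def place(pos, acc):
--             return acc | (1 << (total_size - 1 - pos))
--     else:
--         init = (1 << total_size) - 1
--         def place(pos, acc):
--             return acc & ~(1 << (total_size - 1 - pos))
--
--     results = []
--     # Explicit DFS stack over (next position, bits still to place, value so far);
--     # the "place a bit here" branch is pushed last so it is explored first,
--     # which reproduces the lexicographic order of combinations.
--     stack = [(0, num_bits, init)]
--     while stack:
--         pos, left, acc = stack.pop()
--         if left == 0:
--             results.append(acc)
--             continue
--         if pos >= total_size:
--             continue
--         stack.append((pos + 1, left, acc))               # skip this position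
--         stack.append((pos + 1, left - 1, place(pos, acc)))  # place a bit here
--     return results
-- ===== Notes on version B (the rewrite author's own statement) =====
-- stated objective: alternative
-- what changed: Replaces itertools.combinations plus a nested per-combination bit loop with a single explicit-stack depth-first search over (position, bits-left, accumulated value) that builds each mask incrementally and emits it when the bit budget reaches zero.
import Mathlib
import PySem

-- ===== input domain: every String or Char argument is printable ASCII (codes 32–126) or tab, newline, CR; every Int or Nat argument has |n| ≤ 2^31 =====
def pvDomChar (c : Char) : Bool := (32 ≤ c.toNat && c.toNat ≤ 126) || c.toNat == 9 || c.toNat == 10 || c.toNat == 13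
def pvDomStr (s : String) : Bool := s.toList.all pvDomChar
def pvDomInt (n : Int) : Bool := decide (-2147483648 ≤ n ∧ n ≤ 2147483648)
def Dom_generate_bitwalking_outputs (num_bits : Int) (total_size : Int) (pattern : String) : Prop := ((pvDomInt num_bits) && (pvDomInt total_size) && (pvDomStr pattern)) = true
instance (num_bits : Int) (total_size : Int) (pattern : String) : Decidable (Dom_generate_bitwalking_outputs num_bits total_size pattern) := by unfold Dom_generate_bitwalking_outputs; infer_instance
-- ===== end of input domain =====

-- B replaces itertools.combinations + a per-combination bit loop by one explicit-stack DFS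
-- that builds each mask incrementally (objective: alternative decomposition, same cost class).

-- ===== PORT A =====
-- itertools.combinations(range(total_size), num_bits), lexicographic order
def pvCombos : List Int → Nat → List (List Int)
  | _, 0 => [[]]
  | [], _ + 1 => []
  | x :: xs, k + 1 => (pvCombos xs k).map (fun c => x :: c) ++ pvCombos xs (k + 1)

def generate_bitwalking_outputs (num_bits : Int) (total_size : Int) (pattern : String) : List Int :=
  if num_bits > total_size then []                     -- raise ValueError (outside Pre_)
  else if pattern ≠ "ones" ∧ pattern ≠ "zeros" then [] -- raise ValueError (outside Pre_)
  else
    -- .toNat: combinations raises ValueError for negative num_bits (outside Pre_)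
    let bit_positions := pvCombos (PySem.List.pyRange 0 total_size 1) num_bits.toNat
    if pattern = "ones" then
      -- shift amounts are ≥ 0 for pos ∈ range(total_size), so .toNat is exact here
      bit_positions.map (fun positions =>
        positions.foldl (fun binary pos => PySem.Int.bor binary (1 <<< (total_size - 1 - pos).toNat)) 0)
    else if pattern = "zeros" then
      bit_positions.map (fun positions =>
        positions.foldl (fun binary pos => PySem.Int.band binary (Int.not (1 <<< (total_size - 1 - pos).toNat)))
          ((1 <<< total_size.toNat) - 1))
    else []

-- ===== PORT B =====
def pvStackMeasure (ts : Int) (st : List (Int × Int × Int)) : Nat :=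
  (st.map (fun e => 3 ^ (ts - e.1).toNat)).sum

-- the while-stack loop of Source B; entries are (pos, left, acc), head = top of stack
def pvWalk (ts : Int) (place : Int → Int → Int) : List (Int × Int × Int) → List Int
  | [] => []
  | (pos, left, acc) :: st =>
    if left = 0 then acc :: pvWalk ts place st
    else if pos ≥ ts then pvWalk ts place st
    else pvWalk ts place ((pos + 1, left - 1, place pos acc) :: (pos + 1, left, acc) :: st)
termination_by st => pvStackMeasure ts st
decreasing_by
  all_goals simp only [pvStackMeasure, List.map_cons, List.sum_cons]
  · have : 0 < 3 ^ (ts - pos).toNat := pow_pos (by norm_num) _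
    omega
  · have : 0 < 3 ^ (ts - pos).toNat := pow_pos (by norm_num) _
    omega
  · have hk : (ts - pos).toNat = (ts - (pos + 1)).toNat + 1 := by omega
    rw [hk, pow_succ]
    have : 0 < 3 ^ (ts - (pos + 1)).toNat := pow_pos (by norm_num) _
    omega

def generate_bitwalking_outputs_alt (num_bits : Int) (total_size : Int) (pattern : String) : List Int :=
  if num_bits > total_size then []                     -- raise ValueError (outside Pre_)
  else if pattern ≠ "ones" ∧ pattern ≠ "zeros" then [] -- raise ValueError (outside Pre_)
  else if pattern = "ones" then
    pvWalk total_size (fun pos acc => PySem.Int.bor acc (1 <<< (total_size - 1 - pos).toNat))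
      [(0, num_bits, 0)]
  else
    pvWalk total_size (fun pos acc => PySem.Int.band acc (Int.not (1 <<< (total_size - 1 - pos).toNat)))
      [(0, num_bits, (1 <<< total_size.toNat) - 1)]

-- ===== PRECONDITION & SPEC =====
-- Pre_ excludes exactly the inputs on which A raises ValueError:
-- num_bits > total_size, a pattern other than "ones"/"zeros", and negative num_bits
-- (itertools.combinations raises on a negative r).
def Pre_generate_bitwalking_outputs (num_bits : Int) (total_size : Int) (pattern : String) : Prop :=
  0 ≤ num_bits ∧ num_bits ≤ total_size ∧ (pattern = "ones" ∨ pattern = "zeros")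
instance (num_bits : Int) (total_size : Int) (pattern : String) : Decidable (Pre_generate_bitwalking_outputs num_bits total_size pattern) := by unfold Pre_generate_bitwalking_outputs; infer_instance

def pvWitness_generate_bitwalking_outputs : Int × Int × String := (2, 4, "ones")

def Spec_generate_bitwalking_outputs (num_bits : Int) (total_size : Int) (pattern : String) (out : List Int) : Prop := out = generate_bitwalking_outputs_alt num_bits total_size pattern
instance (num_bits : Int) (total_size : Int) (pattern : String) (out : List Int) : Decidable (Spec_generate_bitwalking_outputs num_bits total_size pattern out) := by unfold Spec_generate_bitwalking_outputs; infer_instance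

-- ===== CLAIM (what is proved, stated in full; the proofs are below) =====
def Claim_equal_generate_bitwalking_outputs : Prop := ∀ (num_bits : Int) (total_size : Int) (pattern : String), Dom_generate_bitwalking_outputs num_bits total_size pattern → Pre_generate_bitwalking_outputs num_bits total_size pattern → Spec_generate_bitwalking_outputs num_bits total_size pattern (generate_bitwalking_outputs num_bits total_size pattern)

-- ===== LEMMAS AND PROOFS =====

-- The DFS starting from (pos, left, acc) emits exactly the combination-folds of the
-- positions pos..ts-1, in combinations' lexicographic order, then continues with the
-- rest of the stack.
lemma pvWalk_eq (ts : Int) (place : Int → Int → Int) :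
    ∀ (n : Nat) (pos left acc : Int) (st : List (Int × Int × Int)),
      (ts - pos).toNat = n → 0 ≤ left →
      pvWalk ts place ((pos, left, acc) :: st) =
        ((pvCombos (PySem.List.pyRange pos ts 1) left.toNat).map
          (fun ps => ps.foldl (fun b p => place p b) acc)) ++ pvWalk ts place st := by
  intro n
  induction n with
  | zero =>
    intro pos left acc st hn hl
    by_cases h0 : left = 0
    · subst h0; simp [pvWalk, pvCombos]
    · have hpos : pos ≥ ts := by omega
      obtain ⟨m, hm⟩ : ∃ m, left.toNat = m + 1 := ⟨left.toNat - 1, by omega⟩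
      rw [PySem.List.pyRange_one_eq_nil (by omega), hm]
      simp [pvWalk, h0, hpos, pvCombos]
  | succ n ih =>
    intro pos left acc st hn hl
    by_cases h0 : left = 0
    · subst h0; simp [pvWalk, pvCombos]
    · have hpos : pos < ts := by omega
      obtain ⟨m, hm⟩ : ∃ m, left.toNat = m + 1 := ⟨left.toNat - 1, by omega⟩
      rw [PySem.List.pyRange_one_cons hpos, hm]
      rw [show pvWalk ts place ((pos, left, acc) :: st) =
            pvWalk ts place ((pos + 1, left - 1, place pos acc) :: (pos + 1, left, acc) :: st) by
          rw [pvWalk]; simp [h0, not_le.mpr hpos]]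
      rw [ih (pos + 1) (left - 1) (place pos acc) _ (by omega) (by omega)]
      rw [ih (pos + 1) left acc st (by omega) hl]
      have hm1 : (left - 1).toNat = m := by omega
      rw [hm1, hm]
      simp [pvCombos, List.map_map, Function.comp_def, List.foldl_cons]

-- ===== VERDICT (by name: the statement is the Claim_ definition above) =====
theorem generate_bitwalking_outputs_spec : Claim_equal_generate_bitwalking_outputs := by
  intro num_bits total_size pattern _ hpre
  obtain ⟨h0, hle, hpat⟩ := hpre
  unfold Spec_generate_bitwalking_outputs generate_bitwalking_outputs generate_bitwalking_outputs_alt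
  have hng : ¬ num_bits > total_size := by omega
  rcases hpat with h | h <;> subst h
  · simp only [if_neg hng, reduceIte, ne_eq]
    rw [pvWalk_eq _ _ (total_size - 0).toNat 0 num_bits _ [] rfl h0]
    rw [pvWalk.eq_1, List.append_nil]
  · simp only [if_neg hng,
      eq_false (show ¬(("zeros" : String) ≠ "ones" ∧ ("zeros" : String) ≠ "zeros") by decide),
      eq_false (show ¬(("zeros" : String) = "ones") by decide),
      if_false, if_true]
    rw [pvWalk_eq _ _ (total_size - 0).toNat 0 num_bits _ [] rfl h0]
    rw [pvWalk.eq_1, List.append_nil]
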